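-- pv_equiv track=rewrite | github.com/soomkim00/Algorithm | SWEA/D2/[D2]_16811_당근_포장하기.py | cal_val
-- ===== SOURCE A (Python) =====
-- def cal_val(counts, N, M):
--     for count in counts:
--         if count > N // 2:
--             return -1
--
--     sum_a = sum_b = sum_c = 0
--     result = []
--     for i in range(2, M):
--         for j in range(i + 1, M + 1):
--             sum_a = sum(counts[0:i])
--             sum_b = sum(counts[i:j])
--             sum_c = sum(counts[j : M + 1])
--             for s in [sum_a, sum_b, sum_c]:
--                 if s > N // 2 or s == 0:
--                     break
--             else:
--                 min_sum = min(sum_a, sum_b, sum_c)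
--                 max_sum = max(sum_a, sum_b, sum_c)
--                 gap = max_sum - min_sum
--                 result.append(gap)
--     if result == []:
--         return -1
--     else:
--         return min(result)
-- ===== SOURCE B (Python) =====
-- def cal_val(counts, N, M):
--     half = N // 2
--     if any(c > half for c in counts):
--         return -1
--     n = len(counts)
--     prefix = [0]
--     s = 0
--     for c in counts:
--         s += c
--         prefix.append(s)
--
--     def seg(a, b):
--         # indices below are always within [0, n]
--         return prefix[min(b, n)] - prefix[min(a, n)]
--
--     best = None
--     for i in range(2, M):
--         sa = seg(0, i)
--         for j in range(i + 1, M + 1):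
--             sb = seg(i, j)
--             sc = seg(j, M + 1)
--             if sa <= half and sa != 0 and sb <= half and sb != 0 and sc <= half and sc != 0:
--                 gap = max(sa, sb, sc) - min(sa, sb, sc)
--                 if best is None or gap < best:
--                     best = gap
--     return -1 if best is None else best
-- ===== Notes on version B (the rewrite author's own statement) =====
-- stated objective: faster
-- what changed: B precomputes a prefix-sum array so each of the O(M^2) partitions gets its three segment sums in O(1) instead of re-summing slices, and it keeps a running minimum gap instead of collecting all gaps in a list and taking min at the end.
import Mathlib
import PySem

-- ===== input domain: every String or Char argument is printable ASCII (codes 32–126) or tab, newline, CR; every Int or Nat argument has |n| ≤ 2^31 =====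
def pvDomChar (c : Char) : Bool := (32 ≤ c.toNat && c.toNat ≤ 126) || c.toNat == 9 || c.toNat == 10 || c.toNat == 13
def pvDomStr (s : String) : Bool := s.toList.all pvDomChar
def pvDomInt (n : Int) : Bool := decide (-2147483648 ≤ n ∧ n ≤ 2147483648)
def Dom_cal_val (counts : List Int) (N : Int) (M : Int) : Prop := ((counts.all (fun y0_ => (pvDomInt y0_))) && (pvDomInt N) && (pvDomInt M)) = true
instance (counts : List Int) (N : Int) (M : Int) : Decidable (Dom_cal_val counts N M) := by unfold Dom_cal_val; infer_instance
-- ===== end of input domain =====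

-- B replaces A's repeated slice summation (O(M) per partition) by a prefix-sum array
-- giving O(1) segment sums, and a running minimum instead of a gap list; objective: faster.

-- ===== PORT A =====
def cal_val (counts : List Int) (N : Int) (M : Int) : Int :=
  if counts.any (fun c => c > PySem.Int.floordiv N 2) then -1
  else
    let result : List Int :=
      (PySem.List.pyRange 2 M 1).foldl (fun res i =>
        (PySem.List.pyRange (i + 1) (M + 1) 1).foldl (fun res j =>
          let sum_a := (PySem.List.slice counts (some 0) (some i)).sum
          let sum_b := (PySem.List.slice counts (some i) (some j)).sum
          let sum_c := (PySem.List.slice counts (some j) (some (M + 1))).sum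
          -- for/else over [sum_a, sum_b, sum_c]: break iff some s is too big or zero
          if sum_a > PySem.Int.floordiv N 2 ∨ sum_a = 0 ∨
             sum_b > PySem.Int.floordiv N 2 ∨ sum_b = 0 ∨
             sum_c > PySem.Int.floordiv N 2 ∨ sum_c = 0 then res
          else res ++ [max sum_a (max sum_b sum_c) - min sum_a (min sum_b sum_c)]) res) []
    match PySem.List.min? result (fun y => y) with
    | none => -1
    | some m => m

-- ===== PORT B =====
def cal_val_alt (counts : List Int) (N : Int) (M : Int) : Int :=
  let half := PySem.Int.floordiv N 2
  if counts.any (fun c => c > half) then -1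
  else
    let n : Int := counts.length
    let pre := (counts.foldl (fun (ps : List Int × Int) c => (ps.1 ++ [ps.2 + c], ps.2 + c)) ([0], 0)).1
    -- prefix[k] for k always within [0, n]: pyGetD's default is never used
    let seg := fun (a b : Int) => PySem.List.pyGetD pre (min b n) 0 - PySem.List.pyGetD pre (min a n) 0
    let best : Option Int :=
      (PySem.List.pyRange 2 M 1).foldl (fun best i =>
        let sa := seg 0 i
        (PySem.List.pyRange (i + 1) (M + 1) 1).foldl (fun best j =>
          let sb := seg i j
          let sc := seg j (M + 1)
          if sa ≤ half ∧ sa ≠ 0 ∧ sb ≤ half ∧ sb ≠ 0 ∧ sc ≤ half ∧ sc ≠ 0 then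
            let gap := max sa (max sb sc) - min sa (min sb sc)
            match best with
            | none => some gap
            | some b => if gap < b then some gap else some b
          else best) best) (none : Option Int)
    match best with
    | none => -1
    | some b => b

-- ===== PRECONDITION & SPEC =====
def Spec_cal_val (counts : List Int) (N : Int) (M : Int) (out : Int) : Prop := out = cal_val_alt counts N M
instance (counts : List Int) (N : Int) (M : Int) (out : Int) : Decidable (Spec_cal_val counts N M out) := by unfold Spec_cal_val; infer_instance

-- ===== CLAIM (what is proved, stated in full; the proofs are below) =====
def Claim_equal_cal_val : Prop := ∀ (counts : List Int) (N : Int) (M : Int), Dom_cal_val counts N M → Spec_cal_val counts N M (cal_val counts N M)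

-- ===== LEMMAS AND PROOFS =====

-- partial sums of xs starting from s
def pvSums (s : Int) : List Int → List Int
  | [] => []
  | c :: t => (s + c) :: pvSums (s + c) t

theorem pvSums_length (xs : List Int) : ∀ s : Int, (pvSums s xs).length = xs.length := by
  induction xs with
  | nil => intro s; rfl
  | cons c t ih => intro s; simp [pvSums, ih]

theorem pvPrefix_eq (xs : List Int) : ∀ (acc : List Int) (s : Int),
    (xs.foldl (fun (ps : List Int × Int) c => (ps.1 ++ [ps.2 + c], ps.2 + c)) (acc, s)).1
      = acc ++ pvSums s xs := by
  induction xs with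
  | nil => intro acc s; simp [pvSums]
  | cons c t ih => intro acc s; simp [List.foldl, pvSums, ih]

theorem pvSums_getD (xs : List Int) : ∀ (s : Int) (k : Nat), k ≤ xs.length →
    (s :: pvSums s xs).getD k 0 = s + (xs.take k).sum := by
  induction xs with
  | nil =>
    intro s k hk
    have : k = 0 := by simpa using hk
    simp [this]
  | cons c t ih =>
    intro s k hk
    cases k with
    | zero => simp
    | succ m =>
      simp only [pvSums, List.length_cons] at *
      have := ih (s + c) m (by omega)
      simpa [List.getD, add_assoc] using this

theorem sum_take_sub (xs : List Int) (A B : Nat) (h : A ≤ B) :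
    ((xs.drop A).take (B - A)).sum = (xs.take B).sum - (xs.take A).sum := by
  have hsplit : xs.take B = xs.take A ++ (xs.drop A).take (B - A) := by
    rw [← List.take_add]
    congr 1
    omega
  rw [hsplit, List.sum_append]
  ring

theorem pvPref_get (counts : List Int) (k : Int) (h0 : 0 ≤ k) (hk : k ≤ (counts.length : Int)) :
    PySem.List.pyGetD (0 :: pvSums 0 counts) k 0 = (counts.take k.toNat).sum := by
  rw [PySem.List.pyGetD_eq_getElem _ _ h0
    (by simp [pvSums_length]; omega)]
  have h := pvSums_getD counts 0 k.toNat (by omega)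
  rw [List.getD_eq_getElem _ _ (by simp [pvSums_length]; omega)] at h
  simpa using h

theorem sum_take_min (counts : List Int) (B : Nat) :
    (counts.take (min B counts.length)).sum = (counts.take B).sum := by
  by_cases h : B ≤ counts.length
  · rw [min_eq_left h]
  · rw [min_eq_right (by omega), List.take_of_length_le (le_refl _),
      List.take_of_length_le (by omega)]

-- the prefix array built by B evaluates segment sums exactly as A's slices do
theorem pvSeg_eq (counts : List Int) (a b : Int) (ha : 0 ≤ a) (hab : a ≤ b) :
    PySem.List.pyGetD (0 :: pvSums 0 counts) (min b (counts.length : Int)) 0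
      - PySem.List.pyGetD (0 :: pvSums 0 counts) (min a (counts.length : Int)) 0
      = (PySem.List.slice counts (some a) (some b)).sum := by
  have hb : 0 ≤ b := le_trans ha hab
  rw [pvPref_get counts _ (by omega) (by omega), pvPref_get counts _ (by omega) (by omega)]
  have hta : (min a (counts.length : Int)).toNat = min a.toNat counts.length := by omega
  have htb : (min b (counts.length : Int)).toNat = min b.toNat counts.length := by omega
  rw [hta, htb, sum_take_min, sum_take_min,
    PySem.List.slice_toNat counts ha hb,
    sum_take_sub counts a.toNat b.toNat (by omega)]

-- running minimum of a list, as an Option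
def pvToMin (acc : List Int) : Option Int :=
  acc.foldl (fun o x => some (match o with | none => x | some b => min b x)) none

theorem pvToMin_append (acc : List Int) (x : Int) :
    pvToMin (acc ++ [x]) = some (match pvToMin acc with | none => x | some b => min b x) := by
  simp [pvToMin]

theorem pvToMin_cons (h : Int) (t : List Int) : pvToMin (h :: t) = some (t.foldl min h) := by
  suffices H : ∀ (t : List Int) (b : Int),
      t.foldl (fun o x => some (match o with | none => x | some b => min b x)) (some b)
        = some (t.foldl min b) by
    simpa [pvToMin] using H t h
  intro t
  induction t with
  | nil => intro b; rfl
  | cons c t ih => intro b; simp [List.foldl, ih]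

theorem pvToMin_min? (acc : List Int) :
    (match PySem.List.min? acc (fun y => y) with | none => (-1 : Int) | some m => m)
      = (match pvToMin acc with | none => (-1 : Int) | some m => m) := by
  cases acc with
  | nil => rfl
  | cons h t => rw [PySem.List.min?_id_cons, pvToMin_cons]

-- fold commutation: a fold that collects and a fold that keeps the running min agree
theorem pvFold_toMin {α : Type} (l : List α) (F : List Int → α → List Int)
    (G : Option Int → α → Option Int)
    (hFG : ∀ acc x, x ∈ l → G (pvToMin acc) x = pvToMin (F acc x)) :
    ∀ acc : List Int, pvToMin (l.foldl F acc) = l.foldl G (pvToMin acc) := by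
  induction l with
  | nil => intro acc; rfl
  | cons c t ih =>
    intro acc
    simp only [List.foldl]
    rw [hFG acc c (by simp)]
    exact ih (fun a x hx => hFG a x (by simp [hx])) (F acc c)

theorem pvMinUpd (g b : Int) : (if g < b then some g else some b) = some (min b g) := by
  split_ifs with h <;> simp [min_def] <;> omega

-- ===== VERDICT (by name: the statement is the Claim_ definition above) =====
theorem cal_val_spec : Claim_equal_cal_val := by
  intro counts N M _
  unfold Spec_cal_val cal_val cal_val_alt
  by_cases hg : counts.any (fun c => c > PySem.Int.floordiv N 2) = true
  · simp only [hg, if_true]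
  · simp only [hg, if_false, Bool.false_eq_true]
    rw [show (List.foldl (fun (ps : List Int × Int) c => (ps.1 ++ [ps.2 + c], ps.2 + c)) ([0], 0) counts).1
          = 0 :: pvSums 0 counts from by simpa using pvPrefix_eq counts [0] 0]
    rw [pvToMin_min?]
    have key : pvToMin
        ((PySem.List.pyRange 2 M 1).foldl (fun res i =>
          (PySem.List.pyRange (i + 1) (M + 1) 1).foldl (fun res j =>
            if (PySem.List.slice counts (some 0) (some i)).sum > PySem.Int.floordiv N 2 ∨
               (PySem.List.slice counts (some 0) (some i)).sum = 0 ∨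
               (PySem.List.slice counts (some i) (some j)).sum > PySem.Int.floordiv N 2 ∨
               (PySem.List.slice counts (some i) (some j)).sum = 0 ∨
               (PySem.List.slice counts (some j) (some (M + 1))).sum > PySem.Int.floordiv N 2 ∨
               (PySem.List.slice counts (some j) (some (M + 1))).sum = 0 then res
            else res ++ [max (PySem.List.slice counts (some 0) (some i)).sum
                  (max (PySem.List.slice counts (some i) (some j)).sum
                    (PySem.List.slice counts (some j) (some (M + 1))).sum) -
                min (PySem.List.slice counts (some 0) (some i)).sum
                  (min (PySem.List.slice counts (some i) (some j)).sum
                    (PySem.List.slice counts (some j) (some (M + 1))).sum)]) res) [])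
        = (PySem.List.pyRange 2 M 1).foldl (fun best i =>
          (PySem.List.pyRange (i + 1) (M + 1) 1).foldl (fun best j =>
            if PySem.List.pyGetD (0 :: pvSums 0 counts) (min i (counts.length : Int)) 0 -
                 PySem.List.pyGetD (0 :: pvSums 0 counts) (min 0 (counts.length : Int)) 0 ≤ PySem.Int.floordiv N 2 ∧
               PySem.List.pyGetD (0 :: pvSums 0 counts) (min i (counts.length : Int)) 0 -
                 PySem.List.pyGetD (0 :: pvSums 0 counts) (min 0 (counts.length : Int)) 0 ≠ 0 ∧
               PySem.List.pyGetD (0 :: pvSums 0 counts) (min j (counts.length : Int)) 0 -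
                 PySem.List.pyGetD (0 :: pvSums 0 counts) (min i (counts.length : Int)) 0 ≤ PySem.Int.floordiv N 2 ∧
               PySem.List.pyGetD (0 :: pvSums 0 counts) (min j (counts.length : Int)) 0 -
                 PySem.List.pyGetD (0 :: pvSums 0 counts) (min i (counts.length : Int)) 0 ≠ 0 ∧
               PySem.List.pyGetD (0 :: pvSums 0 counts) (min (M + 1) (counts.length : Int)) 0 -
                 PySem.List.pyGetD (0 :: pvSums 0 counts) (min j (counts.length : Int)) 0 ≤ PySem.Int.floordiv N 2 ∧
               PySem.List.pyGetD (0 :: pvSums 0 counts) (min (M + 1) (counts.length : Int)) 0 -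
                 PySem.List.pyGetD (0 :: pvSums 0 counts) (min j (counts.length : Int)) 0 ≠ 0 then
              match best with
              | none => some (max (PySem.List.pyGetD (0 :: pvSums 0 counts) (min i (counts.length : Int)) 0 -
                      PySem.List.pyGetD (0 :: pvSums 0 counts) (min 0 (counts.length : Int)) 0)
                    (max (PySem.List.pyGetD (0 :: pvSums 0 counts) (min j (counts.length : Int)) 0 -
                        PySem.List.pyGetD (0 :: pvSums 0 counts) (min i (counts.length : Int)) 0)
                      (PySem.List.pyGetD (0 :: pvSums 0 counts) (min (M + 1) (counts.length : Int)) 0 -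
                        PySem.List.pyGetD (0 :: pvSums 0 counts) (min j (counts.length : Int)) 0)) -
                  min (PySem.List.pyGetD (0 :: pvSums 0 counts) (min i (counts.length : Int)) 0 -
                      PySem.List.pyGetD (0 :: pvSums 0 counts) (min 0 (counts.length : Int)) 0)
                    (min (PySem.List.pyGetD (0 :: pvSums 0 counts) (min j (counts.length : Int)) 0 -
                        PySem.List.pyGetD (0 :: pvSums 0 counts) (min i (counts.length : Int)) 0)
                      (PySem.List.pyGetD (0 :: pvSums 0 counts) (min (M + 1) (counts.length : Int)) 0 -
                        PySem.List.pyGetD (0 :: pvSums 0 counts) (min j (counts.length : Int)) 0)))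
              | some b =>
                if (max (PySem.List.pyGetD (0 :: pvSums 0 counts) (min i (counts.length : Int)) 0 -
                      PySem.List.pyGetD (0 :: pvSums 0 counts) (min 0 (counts.length : Int)) 0)
                    (max (PySem.List.pyGetD (0 :: pvSums 0 counts) (min j (counts.length : Int)) 0 -
                        PySem.List.pyGetD (0 :: pvSums 0 counts) (min i (counts.length : Int)) 0)
                      (PySem.List.pyGetD (0 :: pvSums 0 counts) (min (M + 1) (counts.length : Int)) 0 -
                        PySem.List.pyGetD (0 :: pvSums 0 counts) (min j (counts.length : Int)) 0)) -
                  min (PySem.List.pyGetD (0 :: pvSums 0 counts) (min i (counts.length : Int)) 0 -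
                      PySem.List.pyGetD (0 :: pvSums 0 counts) (min 0 (counts.length : Int)) 0)
                    (min (PySem.List.pyGetD (0 :: pvSums 0 counts) (min j (counts.length : Int)) 0 -
                        PySem.List.pyGetD (0 :: pvSums 0 counts) (min i (counts.length : Int)) 0)
                      (PySem.List.pyGetD (0 :: pvSums 0 counts) (min (M + 1) (counts.length : Int)) 0 -
                        PySem.List.pyGetD (0 :: pvSums 0 counts) (min j (counts.length : Int)) 0))) < b
                then some (max (PySem.List.pyGetD (0 :: pvSums 0 counts) (min i (counts.length : Int)) 0 -
                      PySem.List.pyGetD (0 :: pvSums 0 counts) (min 0 (counts.length : Int)) 0)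
                    (max (PySem.List.pyGetD (0 :: pvSums 0 counts) (min j (counts.length : Int)) 0 -
                        PySem.List.pyGetD (0 :: pvSums 0 counts) (min i (counts.length : Int)) 0)
                      (PySem.List.pyGetD (0 :: pvSums 0 counts) (min (M + 1) (counts.length : Int)) 0 -
                        PySem.List.pyGetD (0 :: pvSums 0 counts) (min j (counts.length : Int)) 0)) -
                  min (PySem.List.pyGetD (0 :: pvSums 0 counts) (min i (counts.length : Int)) 0 -
                      PySem.List.pyGetD (0 :: pvSums 0 counts) (min 0 (counts.length : Int)) 0)
                    (min (PySem.List.pyGetD (0 :: pvSums 0 counts) (min j (counts.length : Int)) 0 -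
                        PySem.List.pyGetD (0 :: pvSums 0 counts) (min i (counts.length : Int)) 0)
                      (PySem.List.pyGetD (0 :: pvSums 0 counts) (min (M + 1) (counts.length : Int)) 0 -
                        PySem.List.pyGetD (0 :: pvSums 0 counts) (min j (counts.length : Int)) 0)))
                else some b
            else best) best) (none : Option Int) := by
      refine pvFold_toMin (PySem.List.pyRange 2 M 1) _ _ ?_ []
      intro acc i hi
      obtain ⟨hi2, hiM⟩ := (PySem.List.mem_pyRange_one).1 hi
      refine (pvFold_toMin (PySem.List.pyRange (i + 1) (M + 1) 1) _ _ ?_ acc).symm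
      intro acc' j hj
      ·
          obtain ⟨hj1, hjM⟩ := (PySem.List.mem_pyRange_one).1 hj
          rw [pvSeg_eq counts 0 i (by omega) (by omega),
              pvSeg_eq counts i j (by omega) (by omega),
              pvSeg_eq counts j (M + 1) (by omega) (by omega)]
          by_cases hc : (PySem.List.slice counts (some 0) (some i)).sum > PySem.Int.floordiv N 2 ∨
               (PySem.List.slice counts (some 0) (some i)).sum = 0 ∨
               (PySem.List.slice counts (some i) (some j)).sum > PySem.Int.floordiv N 2 ∨
               (PySem.List.slice counts (some i) (some j)).sum = 0 ∨
               (PySem.List.slice counts (some j) (some (M + 1))).sum > PySem.Int.floordiv N 2 ∨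
               (PySem.List.slice counts (some j) (some (M + 1))).sum = 0
          · rw [if_neg (by omega), if_pos hc]
          · rw [if_pos (by omega), if_neg hc, pvToMin_append]
            cases pvToMin acc' with
            | none => rfl
            | some b => exact pvMinUpd _ b
    rw [key]
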